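-- pv_equiv track=rewrite | github.com/hasanbaig/CodeShuffler | lib/functions.py | generate_partial_answers
-- ===== SOURCE A (Python) =====
-- def numerize_code(input_code):
--     num_line_pair = {}
--     for line in range(len(input_code)):
--         num_line_pair[line+1] = input_code[line]
--     return num_line_pair
--
-- def swap_lines(num_partials, numbered_code, incorrect_lines):
--     code_copy = numbered_code.copy()
--     num_swaps = num_partials
--     for num, _ in code_copy.items():
--         if num_swaps == 0:
--             break
--         if num in incorrect_lines:
--             code_copy[num] = incorrect_lines[num]
--             num_swaps -= 1
--     swapped_code = list(code_copy.values())
--     return swapped_code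
--
-- def generate_partial_answers(base_code, no_of_choices, incorrect_lines):
--     num_partials = no_of_choices//2
--     partial_options = []
--     numerized_code = numerize_code(base_code)
--     for swap in range(num_partials, 0, -1):
--         partial_option = swap_lines(swap, numerized_code, incorrect_lines)
--         partial_options.append(partial_option)
--     return partial_options
-- ===== SOURCE B (Python) =====
-- def generate_partial_answers(base_code, no_of_choices, incorrect_lines):
--     num_partials = no_of_choices // 2
--     variants = []
--     current = list(base_code)
--     k = 0
--     for i in range(len(base_code)):
--         if k >= num_partials:
--             break
--         if i + 1 in incorrect_lines:
--             current = list(current)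
--             current[i] = incorrect_lines[i + 1]
--             variants.append(current)
--             k += 1
--     while k < num_partials:
--         variants.append(list(current))
--         k += 1
--     return variants[::-1]
-- ===== Notes on version B (the rewrite author's own statement) =====
-- stated objective: alternative
-- what changed: B replaces A's per-variant budgeted rescan of the numbered dict by a single incremental forward pass: each variant is obtained from the previous one by overwriting one more incorrect line, variants are collected in ascending swap order (padded with the fully-swapped version when swappable lines run out) and reversed at the end.
import Mathlib
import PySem

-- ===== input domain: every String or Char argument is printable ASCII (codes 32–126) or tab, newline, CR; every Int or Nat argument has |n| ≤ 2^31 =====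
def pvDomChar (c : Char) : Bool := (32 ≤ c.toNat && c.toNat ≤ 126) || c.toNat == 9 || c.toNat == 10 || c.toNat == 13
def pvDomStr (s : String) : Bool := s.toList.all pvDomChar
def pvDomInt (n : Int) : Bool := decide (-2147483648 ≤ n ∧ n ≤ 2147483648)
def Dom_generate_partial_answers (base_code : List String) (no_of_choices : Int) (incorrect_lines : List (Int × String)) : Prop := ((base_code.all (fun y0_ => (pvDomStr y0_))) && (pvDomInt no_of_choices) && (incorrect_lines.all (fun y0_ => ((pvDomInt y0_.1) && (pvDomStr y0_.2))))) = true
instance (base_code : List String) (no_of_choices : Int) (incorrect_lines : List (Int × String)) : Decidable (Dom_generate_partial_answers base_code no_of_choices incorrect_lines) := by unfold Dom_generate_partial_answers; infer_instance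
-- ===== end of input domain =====

-- B replaces A's per-variant budgeted rescans of the numbered dict by ONE incremental forward
-- pass (each variant is the previous one with one more line overwritten), padding then reversing
-- (objective: alternative decomposition; same return value).

-- ===== PORT A =====
def numerize_code (input_code : List String) : PySem.Dict Int String :=
  (PySem.List.pyRange 0 input_code.length 1).foldl
    (fun num_line_pair line =>
      num_line_pair.insert (line + 1) (PySem.List.pyGetD input_code line ""))
    PySem.Dict.empty

-- the 'for num, _ in code_copy.items(): …' loop of swap_lines, with its early break;
-- `incorrect_lines[num]` is read with getD after the membership test guarantees the key is present
def swapLinesLoop (items : List (Int × String)) (code_copy : PySem.Dict Int String)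
    (num_swaps : Int) (incorrect_lines : PySem.Dict Int String) : PySem.Dict Int String :=
  match items with
  | [] => code_copy
  | (num, _) :: rest =>
    if num_swaps = 0 then code_copy
    else if incorrect_lines.contains num then
      swapLinesLoop rest (code_copy.insert num (incorrect_lines.getD num "")) (num_swaps - 1) incorrect_lines
    else
      swapLinesLoop rest code_copy num_swaps incorrect_lines

def swap_lines (num_partials : Int) (numbered_code : PySem.Dict Int String)
    (incorrect_lines : PySem.Dict Int String) : List String :=
  (swapLinesLoop numbered_code.items numbered_code num_partials incorrect_lines).values

def generate_partial_answers (base_code : List String) (no_of_choices : Int)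
    (incorrect_lines : List (Int × String)) : List (List String) :=
  let num_partials := PySem.Int.floordiv no_of_choices 2
  let incd := PySem.Dict.ofList incorrect_lines
  let numerized_code := numerize_code base_code
  (PySem.List.pyRange num_partials 0 (-1)).foldl
    (fun partial_options swap => partial_options ++ [swap_lines swap numerized_code incd]) []

-- ===== PORT B =====
-- Source B's 'for i in range(len(base_code))' loop: state (current, variants, k), early break on k >= p
def gpaScan (incd : PySem.Dict Int String) (p : Int) :
    List Nat → List String → List (List String) → Int → (List String × List (List String) × Int)
  | [], current, variants, k => (current, variants, k)
  | i :: rest, current, variants, k =>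
    if p ≤ k then (current, variants, k)
    else if incd.contains ((i : Int) + 1) then
      let cur' := current.set i (incd.getD ((i : Int) + 1) "")
      gpaScan incd p rest cur' (variants ++ [cur']) (k + 1)
    else gpaScan incd p rest current variants k

-- Source B's 'while k < num_partials' padding loop
def gpaPad (p : Int) (variants : List (List String)) (current : List String) (k : Int) :
    List (List String) :=
  if k < p then gpaPad p (variants ++ [current]) current (k + 1) else variants
termination_by (p - k).toNat
decreasing_by omega

def generate_partial_answers_alt (base_code : List String) (no_of_choices : Int)
    (incorrect_lines : List (Int × String)) : List (List String) :=
  let num_partials := PySem.Int.floordiv no_of_choices 2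
  let incd := PySem.Dict.ofList incorrect_lines
  let res := gpaScan incd num_partials (List.range base_code.length) base_code [] 0
  (gpaPad num_partials res.2.1 res.1 res.2.2).reverse

-- ===== PRECONDITION & SPEC =====
def Spec_generate_partial_answers (base_code : List String) (no_of_choices : Int) (incorrect_lines : List (Int × String)) (out : List (List String)) : Prop := out = generate_partial_answers_alt base_code no_of_choices incorrect_lines
instance (base_code : List String) (no_of_choices : Int) (incorrect_lines : List (Int × String)) (out : List (List String)) : Decidable (Spec_generate_partial_answers base_code no_of_choices incorrect_lines out) := by unfold Spec_generate_partial_answers; infer_instance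

-- ===== CLAIM (what is proved, stated in full; the proofs are below) =====
def Claim_equal_generate_partial_answers : Prop := ∀ (base_code : List String) (no_of_choices : Int) (incorrect_lines : List (Int × String)), Dom_generate_partial_answers base_code no_of_choices incorrect_lines → Spec_generate_partial_answers base_code no_of_choices incorrect_lines (generate_partial_answers base_code no_of_choices incorrect_lines)

-- ===== LEMMAS AND PROOFS =====

-- notations for the common normal form
def gpaStep (d : PySem.Dict Int String) (v : List String) (i : Nat) : List String :=
  v.set i (d.getD ((i : Int) + 1) "")

def gpaIdx (d : PySem.Dict Int String) (n : Nat) : List Nat :=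
  (List.range n).filter (fun i => d.contains ((i : Int) + 1))

-- chain of prefix folds: variant after 1, 2, … swaps
def prefixFolds (d : PySem.Dict Int String) : List String → List Nat → List (List String)
  | _, [] => []
  | cur, i :: rest => (gpaStep d cur i) :: prefixFolds d (gpaStep d cur i) rest

-- ---------- A-side: A = map over the countdown range of take-k folds ----------
def numDict (vs : List String) : PySem.Dict Int String :=
  PySem.Dict.mk ((List.range vs.length).map (fun (j : Nat) => (((j : Int) + 1), vs.getD j "")))

theorem numerize_aux (vs : List String) (n : Nat) :
    (List.range n).foldl
      (fun (d : PySem.Dict Int String) (line : Nat) => d.insert ((line : Int) + 1) (PySem.List.pyGetD vs line ""))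
      PySem.Dict.empty
    = PySem.Dict.mk ((List.range n).map (fun (j : Nat) => (((j : Int) + 1), vs.getD j ""))) := by
  induction n with
  | zero => rfl
  | succ n ih =>
    rw [List.range_succ, List.foldl_append, List.map_append, ih]
    have hc : (PySem.Dict.mk ((List.range n).map (fun (j : Nat) => (((j : Int) + 1), vs.getD j "")))).contains ((n : Int) + 1) = false := by
      simp only [PySem.Dict.contains_mk, List.any_map, List.any_eq_false]
      intro j hj
      simp only [List.mem_range] at hj
      simp; omega
    apply PySem.Dict.ext
    rw [List.foldl_cons, List.foldl_nil, PySem.Dict.items_insert_of_not_contains _ _ hc]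
    simp [List.getD_eq_getElem?_getD, PySem.List.pyGetD_natCast]

theorem numerize_eq (vs : List String) : numerize_code vs = numDict vs := by
  unfold numerize_code numDict
  rw [PySem.List.pyRange_zero_natCast, List.foldl_map]
  exact numerize_aux vs vs.length

theorem values_numDict (vs : List String) : (numDict vs).values = vs := by
  simp only [numDict, PySem.Dict.values_mk, List.map_map, Function.comp_def]
  apply List.ext_getElem
  . simp
  . intro i h1 h2; simp_all [List.getD_eq_getElem?_getD]

theorem insert_numDict (vs : List String) (i : Nat) (w : String) (hi : i < vs.length) :
    (numDict vs).insert ((i : Int) + 1) w = numDict (vs.set i w) := by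
  have hc : (numDict vs).contains ((i : Int) + 1) = true := by
    simp only [numDict, PySem.Dict.contains_mk, List.any_map, List.any_eq_true]
    exact ⟨i, by simp [hi], by simp⟩
  apply PySem.Dict.ext
  rw [PySem.Dict.items_insert_of_contains _ _ hc]
  simp only [numDict, List.map_map, List.length_set]
  apply List.map_congr_left
  intro j hj
  simp only [List.mem_range] at hj
  by_cases h : j = i
  . subst h
    simp [List.getD_eq_getElem?_getD, hj]
  . have hne : ¬ ((j : Int) + 1 = (i : Int) + 1) := by omega
    simp [hne, List.getD_eq_getElem?_getD, List.getElem?_set_ne (by omega : i ≠ j)]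

theorem swapLoop_eq (d : PySem.Dict Int String) :
    ∀ (idxs : List Nat) (vs : List String) (ps : List (Int × String)) (m : Int),
    0 ≤ m → (∀ i ∈ idxs, i < vs.length) →
    ps.map Prod.fst = idxs.map (fun (i : Nat) => (i : Int) + 1) →
    (swapLinesLoop ps (numDict vs) m d).values
      = ((idxs.filter (fun (i : Nat) => d.contains ((i : Int) + 1))).take m.toNat).foldl
          (gpaStep d) vs := by
  intro idxs
  induction idxs with
  | nil =>
    intro vs ps m hm hlen hps
    have : ps = [] := by simpa using hps
    subst this
    simp [swapLinesLoop, values_numDict]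
  | cons i idxs' ih =>
    intro vs ps m hm hlen hps
    match ps with
    | [] => simp at hps
    | (num, s) :: ps' =>
      simp only [List.map_cons, List.cons.injEq] at hps
      obtain ⟨hnum, hps'⟩ := hps
      subst hnum
      by_cases hm0 : m = 0
      . subst hm0
        simp [swapLinesLoop, values_numDict]
      . have hi : i < vs.length := hlen i (by simp)
        by_cases hc : d.contains ((i : Int) + 1) = true
        . have h1 : m.toNat = (m - 1).toNat + 1 := by omega
          rw [swapLinesLoop]
          simp only [hm0, if_false, hc, if_true]
          rw [insert_numDict vs i _ hi]
          rw [ih (vs.set i _) ps' (m - 1) (by omega)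
            (by intro j hj; rw [List.length_set]; exact hlen j (by simp [hj])) hps']
          rw [List.filter_cons]
          simp only [hc, if_true]
          rw [h1, List.take_succ_cons, List.foldl_cons]
          rfl
        . rw [swapLinesLoop]
          rw [Bool.not_eq_true] at hc
          simp only [hm0, if_false, hc, Bool.false_eq_true, if_false]
          rw [ih vs ps' m hm (fun j hj => hlen j (by simp [hj])) hps']
          rw [List.filter_cons]
          simp only [hc, Bool.false_eq_true, if_false]

theorem A_normal (base_code : List String) (no_of_choices : Int) (incorrect_lines : List (Int × String)) :
    generate_partial_answers base_code no_of_choices incorrect_lines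
      = (PySem.List.pyRange (PySem.Int.floordiv no_of_choices 2) 0 (-1)).map
          (fun k => ((gpaIdx (PySem.Dict.ofList incorrect_lines) base_code.length).take k.toNat).foldl
            (gpaStep (PySem.Dict.ofList incorrect_lines)) base_code) := by
  unfold generate_partial_answers
  rw [PySem.List.foldl_append_singleton_eq_map]
  simp only [List.nil_append]
  apply List.map_congr_left
  intro k hk
  rw [PySem.List.mem_pyRange_neg_one] at hk
  unfold swap_lines gpaIdx
  rw [numerize_eq]
  exact swapLoop_eq _ (List.range base_code.length) base_code (numDict base_code).items k
    (by omega) (by intro i hi; simpa using hi)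
    (by simp only [numDict, List.map_map]; rfl)

-- ---------- B-side lemmas ----------
theorem gpaScan_eq (d : PySem.Dict Int String) (p : Int) :
    ∀ (idxs : List Nat) (cur : List String) (vars : List (List String)) (k : Int), 0 ≤ k →
    gpaScan d p idxs cur vars k
      = (((idxs.filter (fun (i : Nat) => d.contains ((i : Int) + 1))).take (p - k).toNat).foldl (gpaStep d) cur,
         vars ++ prefixFolds d cur ((idxs.filter (fun (i : Nat) => d.contains ((i : Int) + 1))).take (p - k).toNat),
         k + ((idxs.filter (fun (i : Nat) => d.contains ((i : Int) + 1))).take (p - k).toNat).length) := by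
  intro idxs
  induction idxs with
  | nil => intro cur vars k hk; simp [gpaScan, prefixFolds]
  | cons i rest ih =>
    intro cur vars k hk
    rw [gpaScan]
    by_cases hp : p ≤ k
    . have h0 : (p - k).toNat = 0 := by omega
      simp [hp, h0, prefixFolds]
    . simp only [hp, if_false]
      rw [List.filter_cons]
      by_cases hc : d.contains ((i : Int) + 1) = true
      . have h1 : (p - k).toNat = (p - (k + 1)).toNat + 1 := by omega
        simp only [hc, if_true]
        rw [ih _ _ (k + 1) (by omega), h1, List.take_succ_cons]
        simp only [List.foldl_cons, prefixFolds, List.append_assoc, List.singleton_append,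
          List.length_cons, gpaStep, Prod.mk.injEq]
        exact ⟨trivial, trivial, by push_cast; ring⟩
      . rw [Bool.not_eq_true] at hc
        simp only [hc, Bool.false_eq_true, if_false]
        exact ih cur vars k hk

theorem gpaPad_eq (p : Int) : ∀ (n : Nat) (vars : List (List String)) (cur : List String) (k : Int),
    (p - k).toNat = n → gpaPad p vars cur k = vars ++ List.replicate n cur := by
  intro n
  induction n with
  | zero =>
    intro vars cur k hn
    rw [gpaPad]
    have : ¬ k < p := by omega
    simp [this]
  | succ n ih =>
    intro vars cur k hn
    rw [gpaPad]
    have hlt : k < p := by omega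
    simp only [hlt, if_true]
    rw [ih (vars ++ [cur]) cur (k + 1) (by omega)]
    simp [List.replicate_succ]

theorem prefixFolds_eq (d : PySem.Dict Int String) :
    ∀ (t : List Nat) (cur : List String),
    prefixFolds d cur t = (List.range t.length).map (fun j => (t.take (j + 1)).foldl (gpaStep d) cur) := by
  intro t
  induction t with
  | nil => intro cur; rfl
  | cons i rest ih =>
    intro cur
    rw [prefixFolds, ih, List.length_cons, List.range_succ_eq_map]
    simp only [List.map_cons, List.map_map, Function.comp_def]
    congr 1

theorem B_normal (base_code : List String) (no_of_choices : Int) (incorrect_lines : List (Int × String)) :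
    generate_partial_answers_alt base_code no_of_choices incorrect_lines
      = (PySem.List.pyRange (PySem.Int.floordiv no_of_choices 2) 0 (-1)).map
          (fun k => ((gpaIdx (PySem.Dict.ofList incorrect_lines) base_code.length).take k.toNat).foldl
            (gpaStep (PySem.Dict.ofList incorrect_lines)) base_code) := by
  simp only [generate_partial_answers_alt]
  rw [gpaScan_eq (PySem.Dict.ofList incorrect_lines) (PySem.Int.floordiv no_of_choices 2) _ _ _ 0 le_rfl]
  dsimp only
  simp only [Int.sub_zero, List.nil_append, Int.zero_add]
  set p := PySem.Int.floordiv no_of_choices 2 with hp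
  set d := PySem.Dict.ofList incorrect_lines with hd
  have hgi : (List.range base_code.length).filter (fun (i : Nat) => d.contains ((i : Int) + 1)) = gpaIdx d base_code.length := rfl
  rw [hgi]
  set sw := gpaIdx d base_code.length with hsw
  set t := sw.take p.toNat with ht
  have hm : t.length = min p.toNat sw.length := by rw [ht, List.length_take]
  rw [gpaPad_eq p ((p - (t.length : Int)).toNat) _ _ _ rfl]
  -- now: (prefixFolds ++ replicate).reverse = map F (pyRange p 0 (-1))
  rw [PySem.List.pyRange_neg_one_eq_reverse]
  have h01 : (0 : Int) + 1 = 1 := by ring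
  rw [h01, PySem.List.pyRange_one, List.map_reverse, List.map_map]
  congr 1
  -- goal: prefixFolds d base_code t ++ replicate … = (List.range (p+1-1).toNat).map (F ∘ (1 + ·))
  have hP : (p + 1 - 1).toNat = p.toNat := by omega
  rw [hP]
  have hmle : t.length ≤ p.toNat := by omega
  rw [show p.toNat = t.length + (p.toNat - t.length) by omega, List.range_add, List.map_append]
  congr 1
  . -- chain part
    rw [prefixFolds_eq]
    apply List.map_congr_left
    intro j hj
    simp only [List.mem_range] at hj
    simp only [Function.comp_def]
    have hcast : ((1 : Int) + (j : Int)).toNat = j + 1 := by omega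
    rw [hcast]
    congr 1
    rw [ht, List.take_take]
    congr 1
    omega
  . -- replicate part
    have hrep : (p - (t.length : Int)).toNat = p.toNat - t.length := by omega
    rw [hrep]
    rw [List.map_map]
    symm
    apply List.eq_replicate_iff.mpr
    constructor
    . simp
    . intro b hb
      simp only [List.mem_map, List.mem_range] at hb
      obtain ⟨j, hj, hbj⟩ := hb
      subst hbj
      simp only [Function.comp_def]
      congr 1
      -- sw.take (1 + (t.length + j)).toNat = t, using sw.length = t.length when p.toNat > t.length
      have hs : sw.length = t.length := by omega
      have h1 : ((1 : Int) + (((t.length + j : Nat)) : Int)).toNat = t.length + j + 1 := by push_cast; omega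
      rw [h1, ht, hs.symm]
      rw [List.take_of_length_le (by omega), List.take_of_length_le (by omega)]

-- ===== VERDICT (by name: the statement is the Claim_ definition above) =====
theorem generate_partial_answers_spec : Claim_equal_generate_partial_answers := by
  intro base_code no_of_choices incorrect_lines _
  unfold Spec_generate_partial_answers
  rw [A_normal, B_normal]
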